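-- pv_equiv track=rewrite | github.com/edmarkovich/AdventOfCode2023 | day12/day12.py | does_pattern_match
-- ===== SOURCE A (Python) =====
-- def does_pattern_match(string, checksum):
--     pattern = []
--     counting = 0
--
--     for i in range(0, len(string)):
--         if string[i] == ".":
--             if counting > 0:
--                 pattern.append(counting)
--                 counting = 0
--             continue
--         counting = counting+1
--     if counting > 0:
--         pattern.append(counting)
--     return pattern == checksum
-- ===== SOURCE B (Python) =====
-- def does_pattern_match(string, checksum):
--     return [len(g) for g in string.split(".") if g] == checksum
-- ===== Notes on version B (the rewrite author's own statement) =====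
-- stated objective: simpler
-- what changed: B partitions the string into maximal non-'.' runs with str.split('.') up front and compares their lengths, instead of scanning by index with a running counter and emit-on-dot logic.
import Mathlib
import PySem

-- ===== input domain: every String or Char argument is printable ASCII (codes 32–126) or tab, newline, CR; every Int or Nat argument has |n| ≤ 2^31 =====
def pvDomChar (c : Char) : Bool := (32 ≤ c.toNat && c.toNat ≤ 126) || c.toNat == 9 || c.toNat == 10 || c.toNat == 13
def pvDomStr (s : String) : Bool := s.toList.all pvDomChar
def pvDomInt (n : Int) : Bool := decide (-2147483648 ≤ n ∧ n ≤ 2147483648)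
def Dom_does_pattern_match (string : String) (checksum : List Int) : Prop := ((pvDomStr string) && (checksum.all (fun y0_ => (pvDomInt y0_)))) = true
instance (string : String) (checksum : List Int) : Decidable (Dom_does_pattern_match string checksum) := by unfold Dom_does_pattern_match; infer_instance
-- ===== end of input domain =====

-- B replaces A's index loop with a running counter by an up-front split('.') into runs
-- whose lengths are compared with the checksum (objective: simpler).

-- ===== PORT A =====
-- A's loop body: emit-and-reset on '.', otherwise count (state = (pattern, counting))
def pvStep (s : List Int × Int) (c : Char) : List Int × Int :=
  if c = '.' then (if s.2 > 0 then (s.1 ++ [s.2], 0) else s) else (s.1, s.2 + 1)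

-- literal port of A: for i in range(0, len(string)) over the (pattern, counting) state,
-- then the final flush; string[i] is always in range, the pyGetD default is never read.
def does_pattern_match (string : String) (checksum : List Int) : Bool :=
  let st := (PySem.List.pyRange 0 (PySem.Str.len string) 1).foldl
    (fun s i => pvStep s (PySem.List.pyGetD string.toList i ' ')) ([], 0)
  let pattern := if st.2 > 0 then st.1 ++ [st.2] else st.1
  decide (pattern = checksum)

-- ===== PORT B =====
-- literal port of B: [len(g) for g in string.split(".") if g] == checksum
def does_pattern_match_alt (string : String) (checksum : List Int) : Bool :=
  decide ((((PySem.Chars.splitOn string.toList ['.']).filter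
      (fun g => g ≠ [])).map (fun g => ((g.length : Int)))) = checksum)

-- ===== PRECONDITION & SPEC =====
def Spec_does_pattern_match (string : String) (checksum : List Int) (out : Bool) : Prop := out = does_pattern_match_alt string checksum
instance (string : String) (checksum : List Int) (out : Bool) : Decidable (Spec_does_pattern_match string checksum out) := by unfold Spec_does_pattern_match; infer_instance

-- ===== CLAIM (what is proved, stated in full; the proofs are below) =====
def Claim_equal_does_pattern_match : Prop := ∀ (string : String) (checksum : List Int), Dom_does_pattern_match string checksum → Spec_does_pattern_match string checksum (does_pattern_match string checksum)

-- ===== LEMMAS AND PROOFS =====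

-- run lengths of the maximal non-'.' runs of cs, with k characters already pending
def pvRuns (cs : List Char) (k : Int) : List Int :=
  match cs with
  | [] => if k > 0 then [k] else []
  | c :: rest => if c = '.' then (if k > 0 then k :: pvRuns rest 0 else pvRuns rest 0) else pvRuns rest (k + 1)

-- reference splitter: mySplit cs cur = splitOn (cur.reverse ++ cs) ['.'] with cur the pending piece
def pvSplit (cs : List Char) (cur : List Char) : List (List Char) :=
  match cs with
  | [] => [cur.reverse]
  | c :: rest => if c = '.' then cur.reverse :: pvSplit rest [] else pvSplit rest (c :: cur)

theorem pvFoldl_runs (cs : List Char) : ∀ (pattern : List Int) (k : Int), 0 ≤ k →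
    (if (cs.foldl pvStep (pattern, k)).2 > 0
      then (cs.foldl pvStep (pattern, k)).1 ++ [(cs.foldl pvStep (pattern, k)).2]
      else (cs.foldl pvStep (pattern, k)).1) = pattern ++ pvRuns cs k := by
  induction cs with
  | nil => intro pattern k _; simp [pvRuns]; split <;> simp
  | cons c rest ih =>
    intro pattern k hk0
    simp only [List.foldl_cons, pvStep, pvRuns]
    by_cases hc : c = '.' <;> simp [hc]
    · by_cases hk : k > 0
      · simp [hk, ih _ 0 le_rfl]
      · have : k = 0 := by omega
        subst this
        simp [ih _ 0 le_rfl]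
    · exact ih pattern (k + 1) (by omega)

theorem pvGo_spec (cs : List Char) : ∀ (fuel : Nat) (cur : List Char) (acc : List (List Char)),
    cs.length < fuel →
    PySem.Chars.splitOn.go ['.'] fuel cs cur acc = acc.reverse ++ pvSplit cs cur := by
  induction cs with
  | nil =>
    intro fuel cur acc h
    match fuel with
    | f + 1 => simp [PySem.Chars.splitOn.go, pvSplit]
  | cons c rest ih =>
    intro fuel cur acc h
    match fuel with
    | f + 1 =>
      simp only [PySem.Chars.splitOn.go, pvSplit]
      by_cases hc : c = '.'
      · subst hc
        rw [if_pos (by simp [List.isPrefixOf])]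
        simp only [List.length_cons, List.length_nil, List.drop_succ_cons, List.drop_zero]
        rw [ih f [] (cur.reverse :: acc) (by simpa using h)]
        simp
      · rw [if_neg (by simp [List.isPrefixOf]; exact fun h' => hc h'.symm)]
        rw [if_neg hc, ih f (c :: cur) acc (by simpa using h)]

theorem pvSplitOn_eq (cs : List Char) :
    PySem.Chars.splitOn cs ['.'] = pvSplit cs [] := by
  rw [PySem.Chars.splitOn, pvGo_spec cs (cs.length + 1) [] [] (by omega)]
  simp

theorem pvRuns_eq_split (cs : List Char) : ∀ (cur : List Char),
    pvRuns cs (cur.length : Int) =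
      ((pvSplit cs cur).filter (fun g => g ≠ [])).map (fun g => ((g.length : Int))) := by
  induction cs with
  | nil =>
    intro cur
    simp only [pvRuns, pvSplit]
    by_cases hc : cur = []
    · simp [hc]
    · have : (0:Int) < cur.length := by
        have := List.length_pos_iff.mpr hc; exact_mod_cast this
      simp [hc, this]
  | cons c rest ih =>
    intro cur
    simp only [pvRuns, pvSplit]
    by_cases hc : c = '.' <;> simp only [hc, ite_true, ite_false, if_true, if_false, if_neg, not_false_iff]
    · by_cases hcur : cur = []
      · subst hcur
        simpa using ih []
      · have hpos : (0:Int) < cur.length := by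
          have := List.length_pos_iff.mpr hcur; exact_mod_cast this
        have h0 := ih []
        simp only [List.length_nil, Int.natCast_zero] at h0
        simp [hpos, hcur, h0]
    · exact_mod_cast ih (c :: cur)

-- ===== VERDICT (by name: the statement is the Claim_ definition above) =====
theorem does_pattern_match_spec : Claim_equal_does_pattern_match := by
  intro string checksum _
  unfold Spec_does_pattern_match does_pattern_match does_pattern_match_alt
  have hlen : PySem.Str.len string = ((string.toList.length : Nat) : Int) := by
    simp [PySem.Str.len_eq]
  rw [hlen]
  rw [show (PySem.List.pyRange 0 ((string.toList.length : Nat) : Int) 1) =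
      (PySem.List.pyRange 0 ((string.toList.length : Nat) : Int)) from rfl]
  rw [PySem.List.foldl_pyRange_zero_pyGetD' string.toList ' ' pvStep ([], 0)]
  have hruns := pvRuns_eq_split string.toList []
  simp only [List.length_nil, Int.natCast_zero] at hruns
  simp only [pvFoldl_runs string.toList [] 0 le_rfl, pvSplitOn_eq, List.nil_append, hruns]
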